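-- pv_equiv track=rewrite | github.com/Steven-Alicea/MergePDF | src/helpers/page_selection_functions.py | get_page_deletion_list
-- ===== SOURCE A (Python) =====
-- def sort_and_remove_duplicates(pages_list):
--     seen = set()
--     unique_list = []
--     for number in pages_list:
--         number -= 1 # for remove pages function
--         if number not in seen:
--             seen.add(number)
--             unique_list.append(number)
--     unique_list.sort()
--     return unique_list
--
-- def get_page_deletion_list(input_string):
--     result = []
--     for part in input_string.split(','):
--         if '-' in part:
--             start, end = map(int, part.split('-'))
--             result.extend(range(start, end + 1))
--         else:
--             result.append(int(part))
--     result = sort_and_remove_duplicates(result)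
--     return result
-- ===== SOURCE B (Python) =====
-- def _insert_page(pages, v):
--     # insert v into the sorted duplicate-free list `pages` at its binary-search
--     # position, skipping it if already present
--     lo, hi = 0, len(pages)
--     while lo < hi:
--         mid = (lo + hi) // 2
--         if pages[mid] < v:
--             lo = mid + 1
--         else:
--             hi = mid
--     if lo == len(pages) or pages[lo] != v:
--         pages.insert(lo, v)
--
-- def get_page_deletion_list(input_string):
--     pages = []
--     for part in input_string.split(','):
--         if '-' in part:
--             start, end = map(int, part.split('-'))
--             for m in range(start, end + 1):
--                 _insert_page(pages, m - 1)
--         else: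
--             _insert_page(pages, int(part) - 1)
--     return pages
-- ===== Notes on version B (the rewrite author's own statement) =====
-- stated objective: alternative
-- what changed: B keeps no set and never calls sort: it maintains one sorted duplicate-free list throughout, binary-searching each decremented page's position and inserting it there (or skipping it if already present), instead of A's build-raw-list / seen-set dedup loop / final sort pipeline.
import Mathlib
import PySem

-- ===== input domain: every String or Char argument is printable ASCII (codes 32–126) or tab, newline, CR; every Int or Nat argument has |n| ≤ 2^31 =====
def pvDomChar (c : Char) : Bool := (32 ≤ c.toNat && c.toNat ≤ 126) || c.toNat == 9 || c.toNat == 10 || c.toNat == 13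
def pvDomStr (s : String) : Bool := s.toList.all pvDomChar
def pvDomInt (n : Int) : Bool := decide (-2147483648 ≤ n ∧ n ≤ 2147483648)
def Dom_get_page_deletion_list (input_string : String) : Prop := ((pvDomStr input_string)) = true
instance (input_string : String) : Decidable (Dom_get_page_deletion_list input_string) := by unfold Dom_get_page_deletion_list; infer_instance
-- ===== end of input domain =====

-- B keeps no set and never sorts: it maintains one sorted duplicate-free list,
-- binary-searching each decremented page's position and inserting there (skip if present).

-- ===== PORT A =====
-- one parsing step of A's loop body ('none' = the ValueError int()/unpacking raises there)
def pvStepA (acc? : Option (List Int)) (part : List Char) : Option (List Int) :=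
  acc?.bind fun acc =>
    if PySem.Chars.isIn ['-'] part then
      match PySem.Chars.splitOn part ['-'] with
      | [s, e] =>
        match PySem.Int.ofChars? s, PySem.Int.ofChars? e with
        | some st, some en => some (acc ++ PySem.List.pyRange st (en + 1) 1)
        | _, _ => none
      | _ => none
    else (PySem.Int.ofChars? part).map fun n => acc ++ [n]

def sort_and_remove_duplicates (pages_list : List Int) : List Int :=
  let st := pages_list.foldl
    (fun (st : PySem.Set Int × List Int) number =>
      let number := number - 1
      if PySem.Set.contains st.1 number then st
      else (PySem.Set.add st.1 number, st.2 ++ [number]))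
    (PySem.Set.empty, [])
  PySem.List.sorted st.2 (fun x => x) false

def get_page_deletion_list (input_string : String) : List Int :=
  match (PySem.Chars.splitOn input_string.toList [',']).foldl pvStepA (some []) with
  | some result => sort_and_remove_duplicates result
  | none => []   -- unreachable under Pre_: the Python raises ValueError here

-- ===== PORT B =====
-- the hand-written binary-search loop of _insert_page: while lo < hi: mid=(lo+hi)//2; …
-- (fuel = hi - lo bound; the out-of-range branch is unreachable since lo < hi ≤ len)
def pvBisectGo (pages : List Int) (v : Int) : Nat → Nat → Nat → Nat
  | 0, lo, _ => lo
  | fuel + 1, lo, hi =>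
    if lo < hi then
      match pages[(lo + hi) / 2]? with
      | some y =>
        if y < v then pvBisectGo pages v fuel ((lo + hi) / 2 + 1) hi
        else pvBisectGo pages v fuel lo ((lo + hi) / 2)
      | none => lo
    else lo

-- _insert_page(pages, v): binary search, then pages.insert(lo, v) unless pages[lo] == v
def pvInsertPage (pages : List Int) (v : Int) : List Int :=
  let lo := pvBisectGo pages v pages.length 0 pages.length
  if lo = pages.length ∨ PySem.List.pyGet? pages (lo : Int) ≠ some v then
    PySem.List.insert pages (lo : Int) v
  else pages

-- one parsing step of B's loop body, feeding pvInsertPage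
def pvStepB (s? : Option (List Int)) (part : List Char) : Option (List Int) :=
  s?.bind fun pages =>
    if PySem.Chars.isIn ['-'] part then
      match PySem.Chars.splitOn part ['-'] with
      | [a, b] =>
        match PySem.Int.ofChars? a, PySem.Int.ofChars? b with
        | some st, some en =>
            some ((PySem.List.pyRange st (en + 1) 1).foldl
                    (fun pages m => pvInsertPage pages (m - 1)) pages)
        | _, _ => none
      | _ => none
    else (PySem.Int.ofChars? part).map fun n => pvInsertPage pages (n - 1)

def get_page_deletion_list_alt (input_string : String) : List Int :=
  match (PySem.Chars.splitOn input_string.toList [',']).foldl pvStepB (some []) with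
  | some pages => pages
  | none => []   -- unreachable under Pre_: the Python raises ValueError here

-- ===== PRECONDITION & SPEC =====
-- a part parses: a range part splits on '-' into exactly two int literals, any other part is an int literal
def pvPartOK (part : List Char) : Bool :=
  if PySem.Chars.isIn ['-'] part then
    decide ((PySem.Chars.splitOn part ['-']).length = 2) &&
      (PySem.Chars.splitOn part ['-']).all (fun p => (PySem.Int.ofChars? p).isSome)
  else (PySem.Int.ofChars? part).isSome

-- Pre_ excludes exactly the inputs on which A raises ValueError (a malformed int literal,
-- or a range part that does not split into exactly two int literals).
def Pre_get_page_deletion_list (input_string : String) : Prop :=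
  ∀ part ∈ PySem.Chars.splitOn input_string.toList [','], pvPartOK part = true

instance (input_string : String) : Decidable (Pre_get_page_deletion_list input_string) := by
  unfold Pre_get_page_deletion_list; infer_instance

def pvWitness_get_page_deletion_list : String := "1-3,2"

def Spec_get_page_deletion_list (input_string : String) (out : List Int) : Prop := out = get_page_deletion_list_alt input_string
instance (input_string : String) (out : List Int) : Decidable (Spec_get_page_deletion_list input_string out) := by unfold Spec_get_page_deletion_list; infer_instance

-- ===== CLAIM (what is proved, stated in full; the proofs are below) =====
def Claim_equal_get_page_deletion_list : Prop := ∀ (input_string : String), Dom_get_page_deletion_list input_string → Pre_get_page_deletion_list input_string → Spec_get_page_deletion_list input_string (get_page_deletion_list input_string)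

-- ===== LEMMAS AND PROOFS =====

-- the hand-written binary-search loop coincides with bisect_left's loop
lemma pvBisectGo_eq (pages : List Int) (v : Int) :
    ∀ fuel lo hi, pvBisectGo pages v fuel lo hi = PySem.List.bisectLeftLoop pages v fuel lo hi := by
  intro fuel
  induction fuel with
  | zero => intro lo hi; rfl
  | succ fuel ih =>
      intro lo hi
      simp only [pvBisectGo, PySem.List.bisectLeftLoop]
      split_ifs with h
      · cases hx : pages[(lo + hi) / 2]? with
        | none => rfl
        | some y => by_cases hy : y < v <;> simp [hy, ih]
      · rfl

lemma pvBisect_eq_bisectLeft (pages : List Int) (v : Int) :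
    pvBisectGo pages v pages.length 0 pages.length = PySem.List.bisectLeft pages v := by
  simpa [PySem.List.bisectLeft] using pvBisectGo_eq pages v pages.length 0 pages.length

-- pvInsertPage on a strictly sorted list: stays strictly sorted, members gain v
lemma pvInsertPage_spec (pages : List Int) (v : Int) (hs : pages.Pairwise (· < ·)) :
    (pvInsertPage pages v).Pairwise (· < ·) ∧
    (∀ x, x ∈ pvInsertPage pages v ↔ x = v ∨ x ∈ pages) := by
  obtain ⟨hle, hlt, hge⟩ := PySem.List.bisectLeft_spec pages v (hs.imp le_of_lt)
  have hpw := List.pairwise_iff_getElem.mp hs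
  unfold pvInsertPage
  rw [pvBisect_eq_bisectLeft]
  set i := PySem.List.bisectLeft pages v with hidef
  by_cases hc : i = pages.length ∨ PySem.List.pyGet? pages (i : Int) ≠ some v
  · rw [if_pos hc]
    -- every element at index ≥ i is strictly greater than v
    have hvlt : ∀ j (hj : j < pages.length), i ≤ j → v < pages[j] := by
      intro j hj hij
      rcases lt_or_eq_of_le (hge j hj hij) with h | h
      · exact h
      · exfalso
        have hilen : i < pages.length := lt_of_le_of_lt hij hj
        rcases hc with hc | hc
        · omega
        · rw [PySem.List.pyGet?_natCast, List.getElem?_eq_getElem hilen] at hc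
          rcases Nat.eq_or_lt_of_le hij with hij' | hij'
          · exact hc (by simp only [hij']; rw [← h])
          · exact absurd h.symm (ne_of_gt (lt_of_le_of_lt (hge i hilen le_rfl) (hpw i j hilen hj hij')))
    rw [PySem.List.insert_natCast pages i v hle]
    have htake : ∀ a ∈ pages.take i, a < v := by
      intro a ha
      obtain ⟨j, hj, rfl⟩ := List.getElem_of_mem ha
      have hj' : j < i := lt_of_lt_of_le hj (by simp)
      rw [List.getElem_take]
      exact hlt j (lt_of_lt_of_le hj' hle) hj'
    have hdrop : ∀ b ∈ pages.drop i, v < b := by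
      intro b hb
      obtain ⟨j, hj, rfl⟩ := List.getElem_of_mem hb
      rw [List.getElem_drop]
      exact hvlt (i + j) (by simp at hj; omega) (Nat.le_add_right ..)
    constructor
    · rw [List.pairwise_append]
      refine ⟨hs.sublist (List.take_sublist ..), ?_, ?_⟩
      · rw [List.pairwise_cons]
        exact ⟨hdrop, hs.sublist (List.drop_sublist ..)⟩
      · intro a ha b hb
        rcases List.mem_cons.mp hb with rfl | hb
        · exact htake a ha
        · exact lt_trans (htake a ha) (hdrop b hb)
    · intro x
      have hsp := List.take_append_drop i pages
      constructor
      · intro hx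
        rcases List.mem_append.mp hx with h1 | h1
        · exact Or.inr (by rw [← hsp]; exact List.mem_append_left _ h1)
        · rcases List.mem_cons.mp h1 with rfl | h1
          · exact Or.inl rfl
          · exact Or.inr (by rw [← hsp]; exact List.mem_append_right _ h1)
      · rintro (rfl | hx)
        · exact List.mem_append_right _ (List.mem_cons_self ..)
        · rw [← hsp] at hx
          rcases List.mem_append.mp hx with h1 | h1
          · exact List.mem_append_left _ h1
          · exact List.mem_append_right _ (List.mem_cons_of_mem _ h1)
  · rw [if_neg hc]
    push Not at hc
    obtain ⟨hilen, hiv⟩ := hc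
    have hilen' : i < pages.length := lt_of_le_of_lt (le_of_eq rfl) (lt_of_le_of_ne hle hilen)
    rw [PySem.List.pyGet?_natCast, List.getElem?_eq_getElem hilen'] at hiv
    have hmemv : v ∈ pages := by
      rw [← Option.some_inj.mp hiv]
      exact List.getElem_mem _
    exact ⟨hs, fun x => ⟨Or.inr, fun h => h.elim (fun h => h ▸ hmemv) id⟩⟩

-- folding pvInsertPage over any value list preserves the invariant
lemma pvInsertFold_spec (vs pages : List Int) (hs : pages.Pairwise (· < ·)) :
    (vs.foldl pvInsertPage pages).Pairwise (· < ·) ∧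
    (∀ x, x ∈ vs.foldl pvInsertPage pages ↔ x ∈ vs ∨ x ∈ pages) := by
  induction vs generalizing pages with
  | nil => simp [hs]
  | cons y ys ih =>
      obtain ⟨h1, h2⟩ := pvInsertPage_spec pages y hs
      obtain ⟨g1, g2⟩ := ih (pvInsertPage pages y) h1
      refine ⟨g1, fun x => ?_⟩
      rw [List.foldl_cons] at *
      rw [g2 x, h2 x, List.mem_cons]
      tauto

-- the parsing folds of A and B stay in lock-step: B's list is strictly sorted with
-- exactly the decremented members of A's list
lemma pv_fold_rel (parts : List (List Char)) (acc pages : List Int)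
    (h : ∀ part ∈ parts, pvPartOK part = true)
    (hsort : pages.Pairwise (· < ·))
    (hmem : ∀ x, x ∈ pages ↔ x ∈ acc.map (· - 1)) :
    ∃ r q, parts.foldl pvStepA (some acc) = some r ∧
      parts.foldl pvStepB (some pages) = some q ∧
      q.Pairwise (· < ·) ∧ (∀ x, x ∈ q ↔ x ∈ r.map (· - 1)) := by
  induction parts generalizing acc pages with
  | nil => exact ⟨acc, pages, rfl, rfl, hsort, hmem⟩
  | cons p ps ih =>
      have hp := h p (List.mem_cons_self ..)
      have hps : ∀ part ∈ ps, pvPartOK part = true :=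
        fun part hm => h part (List.mem_cons_of_mem _ hm)
      simp only [List.foldl_cons]
      unfold pvPartOK at hp
      by_cases hin : PySem.Chars.isIn ['-'] p
      · rw [if_pos hin] at hp
        obtain ⟨hlen, hall⟩ := by
          have := hp
          simp only [Bool.and_eq_true, decide_eq_true_eq, List.all_eq_true] at this
          exact this
        match hsplit : PySem.Chars.splitOn p ['-'] with
        | [] | [_] | _ :: _ :: _ :: _ => simp [hsplit] at hlen
        | [a, b] =>
          have ha := hall a (by rw [hsplit]; exact List.mem_cons_self ..)
          have hb := hall b (by rw [hsplit]; simp)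
          obtain ⟨st, hst⟩ := Option.isSome_iff_exists.mp ha
          obtain ⟨en, hen⟩ := Option.isSome_iff_exists.mp hb
          have hA : pvStepA (some acc) p
              = some (acc ++ PySem.List.pyRange st (en + 1) 1) := by
            simp [pvStepA, hin, hsplit, hst, hen]
          have hB : pvStepB (some pages) p
              = some (((PySem.List.pyRange st (en + 1) 1).map (· - 1)).foldl pvInsertPage pages) := by
            simp [pvStepB, hin, hsplit, hst, hen, List.foldl_map]
          rw [hA, hB]
          obtain ⟨g1, g2⟩ := pvInsertFold_spec ((PySem.List.pyRange st (en + 1) 1).map (· - 1)) pages hsort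
          refine ih _ _ hps g1 fun x => ?_
          rw [g2 x, hmem x, List.map_append, List.mem_append]
          tauto
      · rw [if_neg hin] at hp
        obtain ⟨n, hn⟩ := Option.isSome_iff_exists.mp hp
        have hA : pvStepA (some acc) p = some (acc ++ [n]) := by
          simp [pvStepA, hin, hn]
        have hB : pvStepB (some pages) p = some (pvInsertPage pages (n - 1)) := by
          simp [pvStepB, hin, hn]
        rw [hA, hB]
        obtain ⟨g1, g2⟩ := pvInsertPage_spec pages (n - 1) hsort
        refine ih _ _ hps g1 fun x => ?_
        rw [g2 x, hmem x, List.map_append]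
        simp
        exact or_comm

-- A's dedup loop keeps seen = unique_list, i.e. it computes Set.update of the start
-- set by the decremented inputs, in both components.
lemma pv_dedup_loop (xs : List Int) (s : PySem.Set Int) :
    xs.foldl
      (fun (st : PySem.Set Int × List Int) number =>
        let number := number - 1
        if PySem.Set.contains st.1 number then st
        else (PySem.Set.add st.1 number, st.2 ++ [number]))
      (s, s)
    = (s.update (xs.map (· - 1)), s.update (xs.map (· - 1))) := by
  induction xs generalizing s with
  | nil => simp [PySem.Set.update]
  | cons x xs ih =>
      have hstep :
          (if PySem.Set.contains s (x - 1) then (s, s)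
           else (PySem.Set.add s (x - 1), s ++ [x - 1]))
          = (PySem.Set.add s (x - 1), PySem.Set.add s (x - 1)) := by
        by_cases h : PySem.Set.contains s (x - 1)
        · have hm : (x - 1) ∈ s := List.mem_of_elem_eq_true h
          simp [PySem.Set.add, hm]
        · have hm : (x - 1) ∉ s := by
            intro hmem
            exact h (List.elem_eq_true_of_mem hmem)
          simp [PySem.Set.add, hm]
      simp only [List.foldl_cons, List.map_cons]
      rw [show PySem.Set.update s ((x - 1) :: xs.map (· - 1))
            = PySem.Set.update (PySem.Set.add s (x - 1)) (xs.map (· - 1)) from rfl]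
      rw [← ih (PySem.Set.add s (x - 1))]
      simp only [hstep]

-- ===== VERDICT (by name: the statement is the Claim_ definition above) =====
theorem get_page_deletion_list_spec : Claim_equal_get_page_deletion_list := by
  unfold Claim_equal_get_page_deletion_list
  intro input_string _ hpre
  unfold Spec_get_page_deletion_list
  obtain ⟨r, q, hA, hB, hq1, hq2⟩ :=
    pv_fold_rel (PySem.Chars.splitOn input_string.toList [',']) [] [] hpre
      (by simp) (by simp)
  unfold get_page_deletion_list get_page_deletion_list_alt
  rw [hA, hB]
  unfold sort_and_remove_duplicates
  rw [show (PySem.Set.empty : PySem.Set Int) = ([] : List Int) from rfl]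
  have := pv_dedup_loop r ([] : PySem.Set Int)
  simp only [this]
  rw [PySem.Set.update_nil_left]
  refine PySem.List.sorted_eq_of_perm_of_pairwise_lt _ q _ ?_ hq1
  refine (List.perm_ext_iff_of_nodup (hq1.imp ne_of_lt) (PySem.Set.nodup_ofList _)).2 fun a => ?_
  rw [hq2 a, PySem.Set.mem_ofList]
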